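-- pv_equiv track=rewrite | github.com/mhytrek/advent_of_code_2023 | adventofcode/12.1.py | count
-- ===== SOURCE A (Python) =====
-- def count(line, expected):
--     curr = 0
--     for i in range(len(line)):
--         if line[i] == "#":
--             curr += 1
--         elif curr != 0:
--             if len(expected) == 0 or expected.pop(0) != curr:
--                 return 0
--             curr = 0
--     if curr != 0:
--         if len(expected) == 0 or expected.pop(0) != curr:
--             return 0
--     if len(expected) == 0:
--         return 1
--     return 0
-- ===== SOURCE B (Python) =====
-- def count(line, expected):
--     runs = [len(run) for run in "".join(c if c == "#" else " " for c in line).split()]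
--     return 1 if runs == expected else 0
-- ===== Notes on version B (the rewrite author's own statement) =====
-- stated objective: simpler
-- what changed: Replaces A's single interleaved scan with mutable run-counter and destructive pops of expected by a two-phase pipeline: blank out non-'#' characters, take str.split() run lengths, and compare the whole run list to expected at once (return value only: A pops from expected, B leaves it untouched).
import Mathlib
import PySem

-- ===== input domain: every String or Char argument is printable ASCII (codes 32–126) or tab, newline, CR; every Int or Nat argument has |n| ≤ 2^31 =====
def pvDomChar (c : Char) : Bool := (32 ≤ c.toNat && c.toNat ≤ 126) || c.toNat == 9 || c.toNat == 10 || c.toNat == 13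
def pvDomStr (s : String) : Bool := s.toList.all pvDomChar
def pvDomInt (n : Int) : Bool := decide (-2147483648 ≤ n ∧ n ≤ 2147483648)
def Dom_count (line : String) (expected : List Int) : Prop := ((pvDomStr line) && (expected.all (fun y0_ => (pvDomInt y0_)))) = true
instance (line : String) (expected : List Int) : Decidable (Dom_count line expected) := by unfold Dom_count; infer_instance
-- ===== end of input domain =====

-- B mask-and-split pipeline replaces A's interleaved scan; equivalence is about the RETURN
-- value only (Python A pops from `expected` in place, Python B does not mutate it).

-- ===== PORT A =====
-- loop over the characters of `line` with state (curr, expected); `expected.pop(0)`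
-- becomes destructuring into head and tail; the trailing `if curr != 0` / final
-- `len(expected) == 0` checks are the [] case of the recursion.
def countLoop (cs : List Char) (curr : Int) (expected : List Int) : Int :=
  match cs with
  | [] =>
    if curr ≠ 0 then
      match expected with
      | [] => 0
      | e :: es => if e ≠ curr then 0 else if es = [] then 1 else 0
    else if expected = [] then 1 else 0
  | c :: rest =>
    if c = '#' then countLoop rest (curr + 1) expected
    else if curr ≠ 0 then
      match expected with
      | [] => 0
      | e :: es => if e ≠ curr then 0 else countLoop rest 0 es
    else countLoop rest curr expected

def count (line : String) (expected : List Int) : Int :=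
  countLoop line.toList 0 expected

-- ===== PORT B =====
def count_alt (line : String) (expected : List Int) : Int :=
  let mask := String.ofList (line.toList.map (fun c => if c = '#' then c else ' '))
  let runs := (PySem.Str.split₀ mask).map (fun run => (PySem.Str.len run : Int))
  if runs = expected then 1 else 0

-- ===== PRECONDITION & SPEC =====
def Spec_count (line : String) (expected : List Int) (out : Int) : Prop := out = count_alt line expected
instance (line : String) (expected : List Int) (out : Int) : Decidable (Spec_count line expected out) := by unfold Spec_count; infer_instance

-- ===== CLAIM (what is proved, stated in full; the proofs are below) =====
def Claim_equal_count : Prop := ∀ (line : String) (expected : List Int), Dom_count line expected → Spec_count line expected (count line expected)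

-- ===== LEMMAS AND PROOFS =====

-- reference list of '#'-run lengths, with `k` the length of the run in progress
def runsRef (k : Nat) (cs : List Char) : List Nat :=
  match cs with
  | [] => if k = 0 then [] else [k]
  | c :: rest =>
    if c = '#' then runsRef (k + 1) rest
    else if k = 0 then runsRef 0 rest
    else k :: runsRef 0 rest

theorem countLoop_eq_runsRef (cs : List Char) (k : Nat) (expected : List Int) :
    countLoop cs (k : Int) expected
      = if (runsRef k cs).map (fun n => (n : Int)) = expected then 1 else 0 := by
  induction cs generalizing k expected with
  | nil =>
    by_cases hk : k = 0
    · subst hk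
      cases expected <;> simp [countLoop, runsRef]
    · have hki : ¬ ((k : Int) = 0) := by exact_mod_cast hk
      cases expected with
      | nil => simp [countLoop, runsRef, hk]
      | cons e es =>
        by_cases he : e = (k : Int)
        · cases es <;> simp [countLoop, runsRef, hk, he]
        · have he' : ¬ ((k : Int) = e) := fun h => he h.symm
          simp [countLoop, runsRef, hk, he, he']
  | cons c rest ih =>
    by_cases hc : c = '#'
    · have hcast : (k : Int) + 1 = ((k + 1 : Nat) : Int) := by push_cast; ring
      rw [show countLoop (c :: rest) (k : Int) expected
            = countLoop rest ((k : Int) + 1) expected by simp [countLoop, hc],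
          hcast, ih]
      simp [runsRef, hc]
    · by_cases hk : k = 0
      · subst hk
        rw [show countLoop (c :: rest) ((0 : Nat) : Int) expected
              = countLoop rest ((0 : Nat) : Int) expected by simp [countLoop, hc], ih]
        simp [runsRef, hc]
      · have hki : ¬ ((k : Int) = 0) := by exact_mod_cast hk
        cases expected with
        | nil => simp [countLoop, runsRef, hc, hk]
        | cons e es =>
          by_cases he : e = (k : Int)
          · rw [show countLoop (c :: rest) (k : Int) (e :: es)
                  = countLoop rest ((0 : Nat) : Int) es by simp [countLoop, hc, hk, he], ih]
            simp [runsRef, hc, hk, he]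
          · have he' : ¬ ((k : Int) = e) := fun h => he h.symm
            simp [countLoop, runsRef, hc, hk, he, he']

theorem splitGo_mask (cs : List Char) (k : Nat) (acc : List (List Char)) :
    PySem.Chars.split₀.go (cs.map (fun c => if c = '#' then c else ' '))
        (List.replicate k '#') acc
      = acc.reverse ++ (runsRef k cs).map (fun n => List.replicate n '#') := by
  induction cs generalizing k acc with
  | nil =>
    by_cases hk : k = 0 <;>
      simp [PySem.Chars.split₀.go, runsRef, hk, List.isEmpty_replicate]
  | cons c rest ih =>
    by_cases hc : c = '#'
    · subst hc
      have h1 : PySem.Chars.isspace '#' = false := by decide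
      have h2 : ('#' : Char) :: List.replicate k '#' = List.replicate (k + 1) '#' := by
        simp [List.replicate_succ]
      simp [PySem.Chars.split₀.go, h1, h2, ih, runsRef]
    · have h1 : PySem.Chars.isspace ' ' = true := by decide
      by_cases hk : k = 0
      · subst hk
        simpa [PySem.Chars.split₀.go, hc, h1, runsRef] using ih 0 acc
      · have hcur : (List.replicate k '#').isEmpty = false := by
          simp [List.isEmpty_replicate, hk]
        rw [show PySem.Chars.split₀.go ((c :: rest).map (fun c => if c = '#' then c else ' '))
              (List.replicate k '#') acc
            = PySem.Chars.split₀.go (rest.map (fun c => if c = '#' then c else ' '))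
              (List.replicate 0 '#') ((List.replicate k '#').reverse :: acc) by
            simp [PySem.Chars.split₀.go, hc, h1, hcur], ih]
        simp [runsRef, hc, hk, List.reverse_replicate]

theorem count_alt_eq_runsRef (line : String) (expected : List Int) :
    count_alt line expected
      = if (runsRef 0 line.toList).map (fun n => (n : Int)) = expected then 1 else 0 := by
  have hsplit := PySem.Str.split₀_map_toList
      (String.ofList (line.toList.map (fun c => if c = '#' then c else ' ')))
  rw [String.toList_ofList] at hsplit
  rw [show PySem.Chars.split₀ (line.toList.map (fun c => if c = '#' then c else ' '))
        = (runsRef 0 line.toList).map (fun n => List.replicate n '#') by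
      simpa using splitGo_mask line.toList 0 []] at hsplit
  have h := congrArg (List.map (fun w : List Char => (w.length : Int))) hsplit
  simp only [List.map_map, Function.comp_def, List.length_replicate] at h
  have hlens : (PySem.Str.split₀
        (String.ofList (line.toList.map (fun c => if c = '#' then c else ' ')))).map
        (fun run => (PySem.Str.len run : Int))
      = (runsRef 0 line.toList).map (fun n => (n : Int)) := by
    have hfun : (fun run : String => (PySem.Str.len run : Int))
        = fun run : String => ((run.toList.length : Nat) : Int) := by
      funext w; simp [PySem.Str.len_eq]
    rw [hfun, h]
    simp
    exact List.map_eq_flatMap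
  simp only [count_alt, hlens]

-- ===== VERDICT (by name: the statement is the Claim_ definition above) =====
theorem count_spec : Claim_equal_count := by
  intro line expected _
  unfold Spec_count
  rw [count_alt_eq_runsRef]
  have h := countLoop_eq_runsRef line.toList 0 expected
  simpa [count] using h
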